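-- pv_equiv track=rewrite | github.com/ASSERT-KTH/Mokav | experiments/pynguin/c4b/return-lst/generated_tests/src_1043/2/src_1043.py | func
-- ===== SOURCE A (Python) =====
-- def func(*args):
-- 	ret_values = []
--
-- 	from math import ceil
-- 	n = int(args[0])
-- 	a = ['', 'Sheldon', 'Leonard', 'Penny', 'Rajesh', 'Howard']
-- 	k = 1
-- 	s = 1
-- 	while ((5 * s) < n):
-- 	    k *= 2
-- 	    s += k
-- 	s -= k
-- 	n = (n - (5 * s))
-- 	n = ceil((n / k))
-- 	ret_values.append(a[n])
--
-- 	return ret_values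
-- ===== SOURCE B (Python) =====
-- def func(*args):
--     from math import ceil
--     n = int(args[0])
--     a = ['', 'Sheldon', 'Leonard', 'Penny', 'Rajesh', 'Howard']
--     # closed form: the block containing n has width 5*2^j where
--     # j = bit_length(ceil(n/5)) - 1; no loop needed.
--     j = max(0, ((n + 4) // 5).bit_length() - 1)
--     k = 1 << j
--     return [a[ceil((n - 5 * (k - 1)) / k)]]
-- ===== Notes on version B (the rewrite author's own statement) =====
-- stated objective: alternative
-- what changed: B replaces A's doubling while-loop (accumulating block sums until they cover n) by a closed-form O(1) computation: the block index is bit_length(ceil(n/5))-1, so the block width k = 1 << j and the name index are computed directly with no loop at all.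
import Mathlib
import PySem

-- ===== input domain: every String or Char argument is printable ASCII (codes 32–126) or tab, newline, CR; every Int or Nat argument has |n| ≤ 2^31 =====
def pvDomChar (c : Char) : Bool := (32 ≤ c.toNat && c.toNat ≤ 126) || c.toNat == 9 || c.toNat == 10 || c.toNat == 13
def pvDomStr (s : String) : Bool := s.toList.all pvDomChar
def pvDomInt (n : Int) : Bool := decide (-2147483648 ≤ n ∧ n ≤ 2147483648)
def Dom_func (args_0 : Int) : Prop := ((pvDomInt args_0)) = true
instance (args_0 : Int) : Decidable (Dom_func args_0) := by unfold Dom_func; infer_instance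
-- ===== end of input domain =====

-- B replaces A's doubling while-loop by a closed form: block index j = bit_length(ceil(n/5)) - 1,
-- block width k = 1 << j, no loop (objective: alternative, O(1) vs O(log n) iterations).

-- math.ceil(x / k): exact integer ceiling division on the admitted inputs
-- (k is a power of two, |x| ≤ 2^34, so the float quotient is exact); shared by both ports.
def pyCeilDiv (a b : Int) : Int := -(PySem.Int.floordiv (-a) b)

-- ===== PORT A =====
-- A's while-loop: while 5*s < n: k *= 2; s += k  (hk : 0 < k only for termination)
def funcLoop (n k s : Int) (hk : 0 < k) : Int × Int :=
  if h : 5 * s < n then funcLoop n (2 * k) (s + 2 * k) (by omega) else (k, s)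
termination_by (n - 5 * s).toNat
decreasing_by omega

def func (args_0 : Int) : List String :=
  let n := args_0
  let a : List String := ["", "Sheldon", "Leonard", "Penny", "Rajesh", "Howard"]
  let p := funcLoop n 1 1 (by norm_num)
  let s := p.2 - p.1
  let n2 := n - 5 * s
  let n3 := pyCeilDiv n2 p.1
  match PySem.List.pyGet? a n3 with   -- a[n3]; none = IndexError, excluded by Pre_func
  | some x => [x]
  | none => []

-- ===== PORT B =====
def func_alt (args_0 : Int) : List String :=
  let n := args_0
  let a : List String := ["", "Sheldon", "Leonard", "Penny", "Rajesh", "Howard"]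
  -- j = max(0, ((n+4)//5).bit_length() - 1): Nat subtraction truncates at 0 = Python's max(0, ...)
  let j : Nat := PySem.Int.bitLength (PySem.Int.floordiv (n + 4) 5) - 1
  let k : Int := 2 ^ j               -- 1 << j
  match PySem.List.pyGet? a (pyCeilDiv (n - 5 * (k - 1)) k) with
  | some x => [x]
  | none => []

-- ===== PRECONDITION & SPEC =====
-- A raises IndexError (a[n] out of range) exactly when args_0 < -6; nothing else is excluded.
def Pre_func (args_0 : Int) : Prop := -6 ≤ args_0
instance (args_0 : Int) : Decidable (Pre_func args_0) := by unfold Pre_func; infer_instance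
def pvWitness_func : Int := (7)

def Spec_func (args_0 : Int) (out : List String) : Prop := out = func_alt args_0
instance (args_0 : Int) (out : List String) : Decidable (Spec_func args_0 out) := by unfold Spec_func; infer_instance

-- ===== CLAIM (what is proved, stated in full; the proofs are below) =====
def Claim_equal_func : Prop := ∀ (args_0 : Int), Dom_func args_0 → Pre_func args_0 → Spec_func args_0 (func args_0)

-- ===== LEMMAS AND PROOFS =====

theorem funcLoop_congr (n k k' s s' : Int) (hk : 0 < k) (hk' : 0 < k')
    (h1 : k = k') (h2 : s = s') : funcLoop n k s hk = funcLoop n k' s' hk' := by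
  subst h1; subst h2; rfl

-- running A's loop from block t up to the stopping block J
theorem loop_run (n : Int) (J : Nat)
    (hstop : ¬ 5 * ((2:Int) ^ (J + 1) - 1) < n)
    (hmin : ∀ t, t < J → 5 * ((2:Int) ^ (t + 1) - 1) < n) :
    ∀ d t, t + d = J → ∀ (hk : (0:Int) < 2 ^ t),
      funcLoop n ((2:Int) ^ t) (2 ^ (t + 1) - 1) hk = (2 ^ J, 2 ^ (J + 1) - 1) := by
  intro d
  induction d with
  | zero =>
      intro t ht hk
      have : t = J := by omega
      subst this
      rw [funcLoop, dif_neg hstop]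
  | succ d ih =>
      intro t ht hk
      rw [funcLoop, dif_pos (hmin t (by omega))]
      rw [funcLoop_congr n _ ((2:Int) ^ (t + 1)) _ ((2:Int) ^ (t + 1 + 1) - 1)
            (by positivity) (by positivity) (by ring) (by ring)]
      exact ih (t + 1) (by omega) _

-- characterization of B's closed-form block index
theorem J_char (n : Int) (h : -6 ≤ n) :
    n ≤ 5 * ((2:Int) ^ ((PySem.Int.bitLength (PySem.Int.floordiv (n + 4) 5) - 1) + 1) - 1) ∧
    ∀ t, t < PySem.Int.bitLength (PySem.Int.floordiv (n + 4) 5) - 1 →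
      5 * ((2:Int) ^ (t + 1) - 1) < n := by
  have hmE : PySem.Int.floordiv (n + 4) 5 = (n + 4) / 5 :=
    PySem.Int.floordiv_eq_ediv_of_pos (by norm_num)
  by_cases hn : n ≤ 5
  · have hJ0 : PySem.Int.bitLength (PySem.Int.floordiv (n + 4) 5) - 1 = 0 := by
      rw [hmE]
      rcases (by omega : (n + 4) / 5 = -1 ∨ (n + 4) / 5 = 0 ∨ (n + 4) / 5 = 1) with h1 | h1 | h1 <;>
        rw [h1] <;> decide
    rw [hJ0]
    refine ⟨by norm_num; omega, ?_⟩
    intro t ht; omega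
  · set m : Int := PySem.Int.floordiv (n + 4) 5 with hm
    have hm2 : 2 ≤ m := by omega
    have hmn : 5 * m - 4 ≤ n ∧ n ≤ 5 * m := by constructor <;> omega
    have hne : m ≠ 0 := by omega
    have hub' := PySem.Int.lt_two_pow_bitLength m
    have hlb' := PySem.Int.two_pow_bitLength_le m hne
    have hnab : (m.natAbs : Int) = m := Int.natAbs_of_nonneg (by omega)
    have hub : m < (2:Int) ^ PySem.Int.bitLength m :=
      calc m ≤ (m.natAbs : Int) := Int.le_natAbs
        _ < ((2 ^ PySem.Int.bitLength m : Nat) : Int) := by exact_mod_cast hub'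
        _ = (2:Int) ^ PySem.Int.bitLength m := by push_cast; ring
    have hlb : (2:Int) ^ (PySem.Int.bitLength m - 1) ≤ m :=
      calc (2:Int) ^ (PySem.Int.bitLength m - 1)
          = ((2 ^ (PySem.Int.bitLength m - 1) : Nat) : Int) := by push_cast; ring
        _ ≤ (m.natAbs : Int) := by exact_mod_cast hlb'
        _ = m := hnab
    have hbl1 : 1 ≤ PySem.Int.bitLength m := by
      by_contra hc
      have : PySem.Int.bitLength m = 0 := by omega
      rw [this] at hub; norm_num at hub; omega
    constructor
    · have : (2:Int) ^ (PySem.Int.bitLength m - 1 + 1) = 2 ^ PySem.Int.bitLength m := by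
        congr 1; omega
      rw [this]; omega
    · intro t ht
      have hp : (2:Int) ^ (t + 1) ≤ 2 ^ (PySem.Int.bitLength m - 1) := by
        gcongr <;> omega
      omega

theorem func_eq_alt (args_0 : Int) (h : -6 ≤ args_0) : func args_0 = func_alt args_0 := by
  obtain ⟨hstop, hmin⟩ := J_char args_0 h
  have hl := loop_run args_0 (PySem.Int.bitLength (PySem.Int.floordiv (args_0 + 4) 5) - 1)
    (not_lt.2 hstop) hmin (PySem.Int.bitLength (PySem.Int.floordiv (args_0 + 4) 5) - 1)
    0 (by omega) (by norm_num)
  simp only [pow_zero, zero_add, pow_one, show (2:Int) - 1 = 1 from rfl] at hl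
  have e : ∀ J : Nat, (2:Int) ^ (J + 1) - 1 - 2 ^ J = 2 ^ J - 1 := by intro J; ring
  unfold func func_alt
  simp only [hl, e]

-- ===== VERDICT (by name: the statement is the Claim_ definition above) =====
theorem func_spec : Claim_equal_func := by
  intro args_0 _ hpre
  unfold Spec_func
  exact func_eq_alt args_0 hpre
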